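-- pv_equiv track=rewrite | github.com/qiaosonghz/transpeed | dimreduction/comb.py | list_combinations_with_ids
-- ===== SOURCE A (Python) =====
-- def get_combination_by_id(arrays, id):
--     combination = []
--     for i in range(len(arrays)):
--         index = id % len(arrays[i])  # 取余数得到当前数组的索引
--         combination.append(arrays[i][index])
--         id //= len(arrays[i])  # 更新id，准备处理下一个数组
--     return combination
--
-- def list_combinations_with_ids(arrays):
--     num_arrays = len(arrays)
--     total_combinations = 1
--     for arr in arrays:
--         total_combinations *= len(arr)
--
--     combinations_with_ids = []
--     for i in range(total_combinations):
--         combination = get_combination_by_id(arrays, i)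
--         combinations_with_ids.append((i, combination))
--
--     return combinations_with_ids
-- ===== SOURCE B (Python) =====
-- def list_combinations_with_ids(arrays):
--     combos = [[]]
--     for array in arrays:
--         combos = [prev + [y] for y in array for prev in combos]
--     return list(enumerate(combos))
-- ===== Notes on version B (the rewrite author's own statement) =====
-- stated objective: alternative
-- what changed: Replaces per-id mixed-radix decoding (recomputing every combination independently from its id via repeated mod/floordiv) by a single incremental Cartesian-product build that extends accumulated partial combinations, then attaches sequential ids with enumerate.
import Mathlib
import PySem

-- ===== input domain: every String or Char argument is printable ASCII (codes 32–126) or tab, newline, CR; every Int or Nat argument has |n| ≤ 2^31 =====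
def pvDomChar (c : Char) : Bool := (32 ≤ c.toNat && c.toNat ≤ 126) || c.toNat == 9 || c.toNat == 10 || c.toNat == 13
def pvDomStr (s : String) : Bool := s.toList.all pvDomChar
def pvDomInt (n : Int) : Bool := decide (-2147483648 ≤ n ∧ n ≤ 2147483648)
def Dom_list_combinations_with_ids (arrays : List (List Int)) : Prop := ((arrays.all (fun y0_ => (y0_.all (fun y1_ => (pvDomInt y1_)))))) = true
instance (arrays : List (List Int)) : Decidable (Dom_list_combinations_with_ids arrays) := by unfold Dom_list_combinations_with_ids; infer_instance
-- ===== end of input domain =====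

-- B replaces A's per-id mixed-radix decode by one incremental Cartesian-product build
-- (extend accumulated partial combinations, then enumerate) — an alternative decomposition.

-- ===== PORT A =====
-- get_combination_by_id: loop over arrays, index = id % len, append arrays[i][index], id //= len.
-- arrays[i][index] is in range whenever len(arrays[i]) > 0 (true on every call A makes,
-- since total_combinations > 0 forces every array nonempty); ported with pyGetD default 0.
def pvGetComb : List (List Int) → Int → List Int
  | [], _ => []
  | arr :: rest, id =>
      PySem.List.pyGetD arr (PySem.Int.mod id (arr.length : Int)) 0
        :: pvGetComb rest (PySem.Int.floordiv id (arr.length : Int))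

def list_combinations_with_ids (arrays : List (List Int)) : List (Int × List Int) :=
  let total : Int := arrays.foldl (fun acc arr => acc * (arr.length : Int)) 1
  (PySem.List.pyRange 0 total 1).foldl
    (fun acc i => acc ++ [(i, pvGetComb arrays i)]) []

-- ===== PORT B =====
def list_combinations_with_ids_alt (arrays : List (List Int)) : List (Int × List Int) :=
  let combos := arrays.foldl
    (fun combos arr => arr.flatMap (fun y => combos.map (fun prev => prev ++ [y]))) [[]]
  PySem.List.enumerate combos 0

-- ===== PRECONDITION & SPEC =====
def Spec_list_combinations_with_ids (arrays : List (List Int)) (out : List (Int × List Int)) : Prop := out = list_combinations_with_ids_alt arrays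
instance (arrays : List (List Int)) (out : List (Int × List Int)) : Decidable (Spec_list_combinations_with_ids arrays out) := by unfold Spec_list_combinations_with_ids; infer_instance

-- ===== CLAIM (what is proved, stated in full; the proofs are below) =====
def Claim_equal_list_combinations_with_ids : Prop := ∀ (arrays : List (List Int)), Dom_list_combinations_with_ids arrays → Spec_list_combinations_with_ids arrays (list_combinations_with_ids arrays)

-- ===== LEMMAS AND PROOFS =====

-- Nat-indexed version of A's decoder (bridge target).
def pvDecode : List (List Int) → Nat → List Int
  | [], _ => []
  | arr :: rest, j => arr.getD (j % arr.length) 0 :: pvDecode rest (j / arr.length)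

def pvProd (arrays : List (List Int)) : Nat := (arrays.map List.length).prod

def pvStep (combos : List (List Int)) (arr : List Int) : List (List Int) :=
  arr.flatMap (fun y => combos.map (fun prev => prev ++ [y]))

theorem pvStep_length (combos : List (List Int)) (arr : List Int) :
    (pvStep combos arr).length = arr.length * combos.length := by
  induction arr with
  | nil => simp [pvStep]
  | cons a as ih =>
      simp only [pvStep, List.flatMap_cons, List.length_append, List.length_map]
      simp only [pvStep] at ih
      rw [ih, List.length_cons, Nat.succ_mul, Nat.add_comm]

theorem pvStep_getElem (combos : List (List Int)) (arr : List Int) (m : Nat)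
    (hm : m < arr.length * combos.length) :
    (pvStep combos arr)[m]? =
      some (combos.getD (m % combos.length) [] ++ [arr.getD (m / combos.length) 0]) := by
  induction arr generalizing m with
  | nil => simp at hm
  | cons a as ih =>
      have hc : 0 < combos.length := by
        rcases Nat.eq_zero_or_pos combos.length with h | h
        · simp [h] at hm
        · exact h
      simp only [pvStep, List.flatMap_cons]
      by_cases hlt : m < combos.length
      · rw [List.getElem?_append_left (by simpa using hlt)]
        rw [Nat.mod_eq_of_lt hlt, Nat.div_eq_of_lt hlt]
        simp [List.getElem?_map, List.getElem?_eq_getElem hlt]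
      · push Not at hlt
        rw [List.getElem?_append_right (by simpa using hlt)]
        have hm' : m - combos.length < as.length * combos.length := by
          rw [List.length_cons, Nat.add_mul, Nat.one_mul] at hm; omega
        have hih := ih (m - combos.length) hm'
        simp only [pvStep] at hih
        rw [List.length_map, hih]
        have e1 : m % combos.length = (m - combos.length) % combos.length := by
          conv_lhs => rw [← Nat.sub_add_cancel hlt]
          rw [Nat.add_mod_right]
        have e2 : m / combos.length = (m - combos.length) / combos.length + 1 := by
          conv_lhs => rw [← Nat.sub_add_cancel hlt]
          rw [Nat.add_div_right _ hc]
        rw [e1, e2, List.getD_cons_succ]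

theorem pvFold_length (arrays : List (List Int)) :
    ∀ combos : List (List Int),
      (arrays.foldl pvStep combos).length = pvProd arrays * combos.length := by
  induction arrays with
  | nil => intro combos; simp [pvProd]
  | cons arr rest ih =>
      intro combos
      simp only [List.foldl_cons, ih, pvStep_length, pvProd, List.map_cons, List.prod_cons]
      ring

theorem pvFold_getElem (arrays : List (List Int)) :
    ∀ (combos : List (List Int)) (j : Nat), j < pvProd arrays * combos.length →
      (arrays.foldl pvStep combos)[j]? =
        some (combos.getD (j % combos.length) [] ++ pvDecode arrays (j / combos.length)) := by
  induction arrays with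
  | nil =>
      intro combos j hj
      simp only [pvProd, List.map_nil, List.prod_nil, Nat.one_mul] at hj
      simp [pvDecode, Nat.mod_eq_of_lt hj, List.getElem?_eq_getElem hj]
  | cons arr rest ih =>
      intro combos j hj
      have hc : 0 < combos.length := by
        rcases Nat.eq_zero_or_pos combos.length with h | h
        · simp [h] at hj
        · exact h
      have hj' : j < pvProd rest * (pvStep combos arr).length := by
        rw [pvStep_length]
        simp only [pvProd, List.map_cons, List.prod_cons] at hj
        calc j < (arr.length * (rest.map List.length).prod) * combos.length := hj
          _ = pvProd rest * (arr.length * combos.length) := by unfold pvProd; ring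
      rw [List.foldl_cons, ih (pvStep combos arr) j hj', pvStep_length]
      have hpos : 0 < arr.length * combos.length := by
        rcases Nat.eq_zero_or_pos (arr.length * combos.length) with h | h
        · rw [pvStep_length, h, Nat.mul_zero] at hj'; omega
        · exact h
      have hjm : j % (arr.length * combos.length) < arr.length * combos.length :=
        Nat.mod_lt _ hpos
      have hstep := pvStep_getElem combos arr (j % (arr.length * combos.length)) hjm
      have hgetD : (pvStep combos arr).getD (j % (arr.length * combos.length)) []
          = combos.getD (j % (arr.length * combos.length) % combos.length) []
            ++ [arr.getD (j % (arr.length * combos.length) / combos.length) 0] := by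
        have hlt : j % (arr.length * combos.length) < (pvStep combos arr).length := by
          rw [pvStep_length]; exact hjm
        rw [List.getD_eq_getElem _ _ hlt]
        rw [List.getElem?_eq_getElem hlt] at hstep
        exact Option.some.inj hstep
      rw [hgetD]
      have h1 : j % (arr.length * combos.length) % combos.length = j % combos.length :=
        Nat.mod_mod_of_dvd j ⟨arr.length, Nat.mul_comm _ _⟩
      have h2 : j % (arr.length * combos.length) / combos.length = j / combos.length % arr.length := by
        rw [Nat.mul_comm arr.length combos.length, Nat.mod_mul_right_div_self]
      have h3 : j / (arr.length * combos.length) = j / combos.length / arr.length := by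
        rw [Nat.div_div_eq_div_mul, Nat.mul_comm]
      rw [h1, h2, h3]
      simp [pvDecode]

theorem pvGetComb_eq_decode (arrays : List (List Int)) :
    ∀ k : Nat, (∀ arr ∈ arrays, arr ≠ []) → pvGetComb arrays (k : Int) = pvDecode arrays k := by
  induction arrays with
  | nil => intro k _; rfl
  | cons arr rest ih =>
      intro k h
      simp only [pvGetComb, pvDecode, PySem.Int.mod_natCast, PySem.Int.floordiv_natCast,
        PySem.List.pyGetD_natCast]
      congr 1
      exact ih _ (fun a ha => h a (List.mem_cons_of_mem _ ha))

theorem pvProd_pos_nonempty (arrays : List (List Int)) (h : 0 < pvProd arrays) :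
    ∀ arr ∈ arrays, arr ≠ [] := by
  intro arr hmem hnil
  have : (0 : Nat) ∈ arrays.map List.length := by
    exact List.mem_map.mpr ⟨arr, hmem, by simp [hnil]⟩
  have := List.prod_eq_zero this
  simp only [pvProd] at h
  omega

theorem pvFoldMul_eq (arrays : List (List Int)) :
    ∀ acc : Int, arrays.foldl (fun acc arr => acc * (arr.length : Int)) acc
      = acc * (pvProd arrays : Int) := by
  induction arrays with
  | nil => intro acc; simp [pvProd]
  | cons arr rest ih =>
      intro acc
      simp only [List.foldl_cons, ih, pvProd, List.map_cons, List.prod_cons]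
      push_cast
      ring

theorem list_combinations_with_ids_spec : Claim_equal_list_combinations_with_ids := by
  intro arrays _
  unfold Spec_list_combinations_with_ids list_combinations_with_ids list_combinations_with_ids_alt
  have htotal : arrays.foldl (fun acc arr => acc * (arr.length : Int)) 1 = ((pvProd arrays : Nat) : Int) := by
    rw [pvFoldMul_eq]; ring
  simp only [htotal, PySem.List.pyRange_zero_natCast, PySem.List.foldl_append_singleton_eq_map,
    List.nil_append, List.map_map]
  have hcombos : (arrays.foldl
      (fun combos arr => arr.flatMap (fun y => combos.map (fun prev => prev ++ [y]))) [[]])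
      = arrays.foldl pvStep [[]] := rfl
  rw [hcombos]
  have hlen : (arrays.foldl pvStep [[]]).length = pvProd arrays := by
    rw [pvFold_length]; simp
  apply List.ext_getElem?
  intro k
  rw [PySem.List.getElem?_enumerate]
  by_cases hk : k < pvProd arrays
  · have hco : (arrays.foldl pvStep [[]])[k]? = some (pvDecode arrays k) := by
      have h := pvFold_getElem arrays [[]] k (by simpa using hk)
      simpa using h
    rw [hco, List.getElem?_map, List.getElem?_range hk]
    have hne := pvProd_pos_nonempty arrays (by omega)
    simp [Function.comp, pvGetComb_eq_decode arrays k hne]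
  · rw [List.getElem?_eq_none (by simp; omega),
      List.getElem?_eq_none (by rw [hlen]; omega)]
    rfl
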